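-- pv_equiv track=rewrite | github.com/dmtr35/conf_backup_python | conf_tools/scan_config.py | change_folder_name
-- ===== SOURCE A (Python) =====
-- def change_folder_name(arr_folder_names, replace_path):
--     if len(arr_folder_names) == 1:
--         return replace_path
--     else:
--         new_path = ""
--         for i in range(len(arr_folder_names) - 1, -1, -1):
--             new_path = replace_path + "/" + new_path
--             replace_path = replace_path.rsplit("*", 1)[0]
--         return new_path.rstrip('/')
-- ===== SOURCE B (Python) =====
-- def change_folder_name(arr_folder_names, replace_path):
--     n = len(arr_folder_names)
--     if n == 1:
--         return replace_path
--     if n == 0: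
--         return ""
--     s = replace_path
--     stars = [i for i, c in enumerate(s) if c == '*']
--     used = stars[-(n - 1):]
--     base = s[:stars[0]] if stars else s
--     levels = [base] * (n - 1 - len(used)) + [s[:i] for i in used] + [s]
--     return '/'.join(levels).rstrip('/')
-- ===== Notes on version B (the rewrite author's own statement) =====
-- stated objective: faster
-- what changed: Instead of A's backward loop that repeatedly rsplit-truncates the path and prepends each snapshot onto a growing string (quadratic in the output size), B scans the path once for the indices of '*', derives every truncation level directly as a slice s[:i] at those indices (padding with the star-free prefix when there are more levels than stars), and joins them once with '/'.
import Mathlib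
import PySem

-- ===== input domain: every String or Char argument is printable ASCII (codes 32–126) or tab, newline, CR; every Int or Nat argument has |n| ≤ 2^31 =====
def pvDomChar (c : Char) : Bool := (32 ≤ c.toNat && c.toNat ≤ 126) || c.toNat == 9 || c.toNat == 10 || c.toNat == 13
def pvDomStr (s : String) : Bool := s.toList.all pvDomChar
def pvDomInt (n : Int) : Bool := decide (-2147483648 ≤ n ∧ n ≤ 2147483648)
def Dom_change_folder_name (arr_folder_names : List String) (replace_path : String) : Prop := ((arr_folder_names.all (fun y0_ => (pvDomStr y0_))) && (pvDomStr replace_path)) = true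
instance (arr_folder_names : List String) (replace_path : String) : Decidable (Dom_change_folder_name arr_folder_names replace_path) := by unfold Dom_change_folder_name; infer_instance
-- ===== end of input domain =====

-- B scans replace_path once for the indices of '*' and builds every truncation level
-- directly as a slice at those indices, instead of A's backward loop that repeatedly
-- rsplit-truncates and prepends onto a growing string; objective: alternative algorithm.

-- ===== PORT A =====
-- s.rsplit("*", 1)[0]: everything before the LAST '*' if one occurs, else s itself.
-- Ported by hand on List Char (exact: single-char separator, maxsplit 1, component 0).
def pvRsplitStar0 (cs : List Char) : List Char :=
  if cs.contains '*' then ((cs.reverse.dropWhile (fun c => c ≠ '*')).tail).reverse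
  else cs

-- s.rstrip('/') ported by hand on List Char (exact: drop trailing '/' characters).
def pvRstripSlash (cs : List Char) : List Char :=
  ((cs.reverse.dropWhile (fun c => c = '/')).reverse)

def change_folder_name (arr_folder_names : List String) (replace_path : String) : String :=
  if arr_folder_names.length = 1 then replace_path
  else
    -- state = (new_path, replace_path), both as List Char; loop ignores the index i
    let st := (PySem.List.pyRange ((arr_folder_names.length : Int) - 1) (-1) (-1)).foldl
      (fun (st : List Char × List Char) _ => (st.2 ++ '/' :: st.1, pvRsplitStar0 st.2))
      ([], replace_path.toList)
    String.ofList (pvRstripSlash st.1)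

-- ===== PORT B =====
def change_folder_name_alt (arr_folder_names : List String) (replace_path : String) : String :=
  let n := arr_folder_names.length
  if n = 1 then replace_path
  else if n = 0 then ""
  else
    let s := replace_path.toList
    -- stars = [i for i, c in enumerate(s) if c == '*']
    let stars := (PySem.List.enumerate s 0).filterMap
      (fun ic => if ic.2 = '*' then some ic.1 else none)
    -- used = stars[-(n - 1):]
    let used := PySem.List.slice stars (some (-((n : Int) - 1))) none
    -- base = s[:stars[0]] if stars else s
    let base := match stars with
      | [] => s
      | j :: _ => PySem.List.slice s none (some j)
    -- levels = [base] * (n - 1 - len(used)) + [s[:i] for i in used] + [s]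
    let levels := PySem.List.pyRepeat [base] ((n : Int) - 1 - (used.length : Int))
      ++ used.map (fun i => PySem.List.slice s none (some i)) ++ [s]
    -- '/'.join(levels).rstrip('/')
    String.ofList (pvRstripSlash (PySem.Chars.join ['/'] levels))

-- ===== PRECONDITION & SPEC =====
def Spec_change_folder_name (arr_folder_names : List String) (replace_path : String) (out : String) : Prop := out = change_folder_name_alt arr_folder_names replace_path
instance (arr_folder_names : List String) (replace_path : String) (out : String) : Decidable (Spec_change_folder_name arr_folder_names replace_path out) := by unfold Spec_change_folder_name; infer_instance

-- ===== CLAIM (what is proved, stated in full; the proofs are below) =====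
def Claim_equal_change_folder_name : Prop := ∀ (arr_folder_names : List String) (replace_path : String), Dom_change_folder_name arr_folder_names replace_path → Spec_change_folder_name arr_folder_names replace_path (change_folder_name arr_folder_names replace_path)

-- ===== LEMMAS AND PROOFS =====

-- star positions of cs, ascending (reference definition for the proofs)
def pvStarPos : List Char → List Nat
  | [] => []
  | c :: cs => (if c = '*' then [0] else []) ++ (pvStarPos cs).map (· + 1)

-- recursion-on-count form of A's loop (proof-side only)
def pvALoop : Nat → List Char → List Char → List Char
  | 0, _, acc => acc
  | n+1, p, acc => pvALoop n (pvRsplitStar0 p) (p ++ '/' :: acc)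

-- the sequence of successive truncations produced by A's loop
def pvFwd : Nat → List Char → List (List Char)
  | 0, _ => []
  | n+1, p => p :: pvFwd n (pvRsplitStar0 p)

-- the same sequence read off a descending list of star positions
def pvLev : Nat → List Char → List Nat → List (List Char)
  | 0, _, _ => []
  | n+1, cs, [] => cs :: pvLev n cs []
  | n+1, cs, j :: ds => cs :: pvLev n (cs.take j) ds

def pvLevBase (cs : List Char) (ds : List Nat) : List Char :=
  cs.take (ds.getLast?.getD cs.length)

-- each part followed by a '/'
def pvFlatTrail (ps : List (List Char)) : List Char := ps.flatMap (fun q => q ++ ['/'])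

theorem pvALoop_foldl {α : Type} (l : List α) :
    ∀ (p acc : List Char),
      l.foldl (fun (st : List Char × List Char) _ => (st.2 ++ '/' :: st.1, pvRsplitStar0 st.2)) (acc, p)
        = (pvALoop l.length p acc, (fun q => pvRsplitStar0 q)^[l.length] p) := by
  induction l with
  | nil => intro p acc; rfl
  | cons x xs ih =>
      intro p acc
      simp only [List.foldl_cons, List.length_cons, pvALoop, ih, Function.iterate_succ_apply]

theorem pvFlatTrail_append_singleton (ps : List (List Char)) (q : List Char) :
    pvFlatTrail (ps ++ [q]) = pvFlatTrail ps ++ (q ++ ['/']) := by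
  simp [pvFlatTrail]

theorem pvALoop_eq (n : Nat) :
    ∀ (p acc : List Char), pvALoop n p acc = pvFlatTrail (pvFwd n p).reverse ++ acc := by
  induction n with
  | zero => intro p acc; simp [pvALoop, pvFwd, pvFlatTrail]
  | succ n ih =>
      intro p acc
      simp only [pvALoop, pvFwd, List.reverse_cons, ih, pvFlatTrail_append_singleton]
      simp

theorem pvRstripSlash_append_slash (cs : List Char) :
    pvRstripSlash (cs ++ ['/']) = pvRstripSlash cs := by
  simp [pvRstripSlash]

theorem pvFlatTrail_eq_join (ps : List (List Char)) (h : ps ≠ []) :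
    pvFlatTrail ps = PySem.Chars.join ['/'] ps ++ ['/'] := by
  induction ps with
  | nil => simp at h
  | cons a rest ih =>
      cases rest with
      | nil => simp [pvFlatTrail, PySem.Chars.join_singleton]
      | cons b rest' =>
          rw [PySem.Chars.join_cons_cons]
          have : pvFlatTrail (a :: b :: rest') = (a ++ ['/']) ++ pvFlatTrail (b :: rest') := by
            simp [pvFlatTrail]
          rw [this, ih (by simp)]
          simp

theorem pvRstrip_flatTrail_eq_join (ps : List (List Char)) :
    pvRstripSlash (pvFlatTrail ps) = pvRstripSlash (PySem.Chars.join ['/'] ps) := by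
  cases h : ps with
  | nil => simp [pvFlatTrail, PySem.Chars.join_nil]
  | cons a rest =>
      rw [pvFlatTrail_eq_join (a :: rest) (by simp), pvRstripSlash_append_slash]

-- ===== star-position lemmas =====

theorem pvStarPos_append (cs : List Char) (c : Char) :
    pvStarPos (cs ++ [c]) = pvStarPos cs ++ (if c = '*' then [cs.length] else []) := by
  induction cs with
  | nil => simp [pvStarPos]
  | cons a cs ih =>
      simp only [List.cons_append, pvStarPos, ih, List.map_append, List.length_cons]
      split_ifs <;> simp


theorem pvStarPos_lt_length (cs : List Char) : ∀ j ∈ pvStarPos cs, j < cs.length := by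
  induction cs with
  | nil => simp [pvStarPos]
  | cons a cs ih =>
      intro j hj
      simp only [pvStarPos, List.mem_append, List.mem_map] at hj
      rcases hj with h | ⟨j', hj', rfl⟩
      · split_ifs at h <;> simp_all
      · have := ih j' hj'; simp; omega


theorem pvStarPos_pairwise (cs : List Char) : (pvStarPos cs).Pairwise (· < ·) := by
  induction cs with
  | nil => simp [pvStarPos]
  | cons a cs ih =>
      simp only [pvStarPos]
      apply List.pairwise_append.mpr
      refine ⟨?_, List.Pairwise.map _ (by omega) ih, ?_⟩
      · split_ifs <;> simp
      · intro x hx y hy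
        split_ifs at hx <;> simp_all
        omega


theorem contains_star_iff (cs : List Char) : cs.contains '*' = true ↔ pvStarPos cs ≠ [] := by
  induction cs with
  | nil => simp [pvStarPos]
  | cons a cs ih =>
      by_cases h : a = '*'
      · simp [pvStarPos, h]
      · have h' : ¬ ('*' = a) := fun hh => h hh.symm
        simpa [pvStarPos, h, h'] using ih


theorem pvStarPos_take (cs : List Char) (k : Nat) :
    pvStarPos (cs.take k) = (pvStarPos cs).filter (· < k) := by
  induction cs generalizing k with
  | nil => simp [pvStarPos]
  | cons a cs ih =>
      cases k with
      | zero => simp [pvStarPos]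
      | succ k =>
          simp only [List.take_succ_cons, pvStarPos, ih, List.filter_append, List.filter_map]
          congr 1
          · split_ifs <;> simp
          · exact congrArg _ (List.filter_congr (fun j _ => by simp [Function.comp])).symm


theorem pvRsplitStar0_eq (cs : List Char) :
    pvRsplitStar0 cs = match (pvStarPos cs).getLast? with
      | none => cs
      | some j => cs.take j := by
  induction cs using List.reverseRecOn with
  | nil => simp [pvRsplitStar0, pvStarPos]
  | append_singleton cs c ih =>
      by_cases hc : c = '*'
      · subst hc
        simp [pvRsplitStar0, pvStarPos_append, List.reverse_append, List.dropWhile]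
      · rw [pvStarPos_append, if_neg hc, List.append_nil]
        by_cases h1 : cs.contains '*' = true
        · obtain ⟨j, hj⟩ : ∃ j, (pvStarPos cs).getLast? = some j := by
            have hne := (contains_star_iff cs).mp h1
            exact Option.isSome_iff_exists.mp (List.getLast?_isSome.mpr hne)
          have hjle : j ≤ cs.length :=
            le_of_lt (pvStarPos_lt_length cs j (List.mem_of_getLast? hj))
          have h1' : '*' ∈ cs := by simpa using h1
          have hlhs : pvRsplitStar0 (cs ++ [c]) = pvRsplitStar0 cs := by
            simp [pvRsplitStar0, h1', List.reverse_append, hc]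
          rw [hlhs, ih, hj]
          simp [List.take_append_of_le_length hjle]
        · have h0 : pvStarPos cs = [] := by
            rcases h' : pvStarPos cs with _ | ⟨a, l⟩
            · rfl
            · exact absurd ((contains_star_iff cs).mpr (by simp [h'])) (by simp_all)
          have h1' : ¬ '*' ∈ cs := by simpa using h1
          have hc' : ¬ '*' = c := fun e => hc e.symm
          rw [h0]
          simp [pvRsplitStar0, h1', hc']


theorem filter_lt_getLast (ps : List Nat) (j : Nat) (hs : ps.Pairwise (· < ·))
    (h : ps.getLast? = some j) : ps.filter (fun x => decide (x < j)) = ps.dropLast := by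
  have hne : ps ≠ [] := fun hh => by simp [hh] at h
  have hj : ps.getLast hne = j := by
    rw [List.getLast?_eq_some_getLast hne] at h
    exact Option.some.inj h
  have hsplit : ps.dropLast ++ [j] = ps := by
    rw [← hj]; exact List.dropLast_append_getLast hne
  have hforall : ∀ x ∈ ps.dropLast, x < j := by
    rw [← hsplit] at hs
    intro x hx
    exact (List.pairwise_append.mp hs).2.2 x hx j (by simp)
  conv_lhs => rw [← hsplit]
  rw [List.filter_append, List.filter_eq_self.mpr (fun x hx => by simp [hforall x hx])]
  simp


theorem pvFwd_eq_pvLev (n : Nat) :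
    ∀ cs : List Char, pvFwd n cs = pvLev n cs (pvStarPos cs).reverse := by
  induction n with
  | zero => intro cs; rfl
  | succ n ih =>
      intro cs
      cases hps : (pvStarPos cs).getLast? with
      | none =>
          have h0 : pvStarPos cs = [] := by
            rcases h' : pvStarPos cs with _ | ⟨a, l⟩
            · rfl
            · simp [h'] at hps
          have ht : pvRsplitStar0 cs = cs := by rw [pvRsplitStar0_eq, hps]
          rw [pvFwd, ht, ih cs, h0]
          rfl
      | some j =>
          have hne : pvStarPos cs ≠ [] := fun hh => by simp [hh] at hps
          have ht : pvRsplitStar0 cs = cs.take j := by rw [pvRsplitStar0_eq, hps]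
          have hsplit : (pvStarPos cs).dropLast ++ [j] = pvStarPos cs := by
            have hj : (pvStarPos cs).getLast hne = j := by
              rw [List.getLast?_eq_some_getLast hne] at hps
              exact Option.some.inj hps
            rw [← hj]; exact List.dropLast_append_getLast hne
          have hrev : (pvStarPos cs).reverse = j :: (pvStarPos cs).dropLast.reverse := by
            conv_lhs => rw [← hsplit]
            simp
          have htake : pvStarPos (cs.take j) = (pvStarPos cs).dropLast := by
            rw [pvStarPos_take]
            exact filter_lt_getLast _ j (pvStarPos_pairwise cs) hps
          rw [pvFwd, ht, ih (cs.take j), htake, hrev, pvLev]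


theorem pvLev_nil (n : Nat) (cs : List Char) : pvLev n cs [] = List.replicate n cs := by
  induction n with
  | zero => rfl
  | succ n ih => simp [pvLev, ih, List.replicate_succ]


theorem pvLev_closed (ds : List Nat) :
    ∀ (cs : List Char) (n : Nat), 1 ≤ n → ds.Pairwise (· ≥ ·) →
      pvLev n cs ds
        = cs :: (ds.take (n-1)).map (cs.take ·) ++ List.replicate ((n-1) - ds.length) (pvLevBase cs ds) := by
  induction ds with
  | nil =>
      intro cs n h1 _
      rw [pvLev_nil]
      cases n with
      | zero => omega
      | succ n => simp [pvLevBase, List.replicate_succ]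
  | cons j ds ih =>
      intro cs n h1 hsort
      obtain ⟨n', rfl⟩ : ∃ n', n = n' + 1 := ⟨n - 1, by omega⟩
      have hj : ∀ x ∈ ds, x ≤ j := fun x hx => (List.pairwise_cons.mp hsort).1 x hx
      have hbase : pvLevBase (cs.take j) ds = pvLevBase cs (j :: ds) := by
        rcases ds with _ | ⟨d, ds'⟩
        · simp [pvLevBase]
        · have hg : (d :: ds').getLast? = some ((d :: ds').getLast (by simp)) :=
            List.getLast?_eq_some_getLast (by simp)
          have hgle : (d :: ds').getLast (by simp) ≤ j :=
            hj _ (List.getLast_mem (by simp))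
          simp only [pvLevBase, List.getLast?_cons_cons, hg, Option.getD_some, List.take_take]
          rw [Nat.min_eq_left hgle]
      cases n' with
      | zero => simp [pvLev]
      | succ n'' =>
          rw [pvLev, ih (cs.take j) (n'' + 1) (by omega) (List.pairwise_cons.mp hsort).2]
          have hmap : (ds.take n'').map ((cs.take j).take ·) = (ds.take n'').map (cs.take ·) := by
            apply List.map_congr_left
            intro x hx
            rw [List.take_take, Nat.min_eq_left (hj x (List.mem_of_mem_take hx))]
          simp only [List.take_succ_cons, List.map_cons, hmap, hbase, List.length_cons,
            Nat.succ_sub_succ]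
          simp
          rw [← List.map_take, ← List.map_take]
          exact hmap


-- B's inline star comprehension equals the reference definition (Int indices)
theorem stars_filterMap_eq (cs : List Char) :
    ∀ k : Int, (PySem.List.enumerate cs k).filterMap
        (fun ic => if ic.2 = '*' then some ic.1 else none)
      = (pvStarPos cs).map (fun j : Nat => k + (j : Int)) := by
  induction cs with
  | nil => intro k; simp [pvStarPos, PySem.List.enumerate_nil]
  | cons c cs ih =>
      intro k
      rw [PySem.List.enumerate_cons]
      by_cases h : c = '*'
      · subst h
        have hstep : List.filterMap (fun ic : Int × Char => if ic.2 = '*' then some ic.1 else none)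
            ((k, '*') :: PySem.List.enumerate cs (k + 1))
            = k :: List.filterMap (fun ic : Int × Char => if ic.2 = '*' then some ic.1 else none)
              (PySem.List.enumerate cs (k + 1)) := by
          simp
        rw [hstep, ih (k + 1),
          show pvStarPos ('*' :: cs) = 0 :: (pvStarPos cs).map (· + 1) from by simp [pvStarPos],
          List.map_cons, List.map_map]
        refine congrArg₂ _ (by simp) (List.map_congr_left fun x _ => ?_)
        simp only [Function.comp_apply]
        push_cast
        ring
      · have hstep : List.filterMap (fun ic : Int × Char => if ic.2 = '*' then some ic.1 else none)
            ((k, c) :: PySem.List.enumerate cs (k + 1))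
            = List.filterMap (fun ic : Int × Char => if ic.2 = '*' then some ic.1 else none)
              (PySem.List.enumerate cs (k + 1)) := by
          simp [h]
        rw [hstep, ih (k + 1),
          show pvStarPos (c :: cs) = (pvStarPos cs).map (· + 1) from by simp [pvStarPos, h],
          List.map_map]
        refine List.map_congr_left fun x _ => ?_
        simp only [Function.comp_apply]
        push_cast
        ring

-- ===== VERDICT (by name: the statement is the Claim_ definition above) =====
-- B's level list is exactly (reversed) the truncation sequence A's loop walks through
theorem levels_eq (s : List Char) (n : Nat) (hn : 2 ≤ n) :
    List.replicate ((((n - 1 : Nat) : Int)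
          - ((((pvStarPos s).drop ((pvStarPos s).length - (n - 1))).map
              (fun j : Nat => (j : Int))).length : Int)).toNat)
        (pvLevBase s (pvStarPos s).reverse)
      ++ ((pvStarPos s).drop ((pvStarPos s).length - (n - 1))).map (s.take ·) ++ [s]
      = (pvFwd n s).reverse := by
  have hpw : ((pvStarPos s).reverse).Pairwise (· ≥ ·) := by
    rw [List.pairwise_reverse]
    exact (pvStarPos_pairwise s).imp le_of_lt
  have hcount : ((((n - 1 : Nat) : Int))
        - ((((pvStarPos s).drop ((pvStarPos s).length - (n - 1))).map
            (fun j : Nat => (j : Int))).length : Int)).toNat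
      = (n - 1) - (pvStarPos s).length := by
    simp only [List.length_map, List.length_drop]
    omega
  rw [hcount]
  have key : (List.replicate ((n - 1) - (pvStarPos s).length) (pvLevBase s (pvStarPos s).reverse)
      ++ ((pvStarPos s).drop ((pvStarPos s).length - (n - 1))).map (s.take ·) ++ [s]).reverse
      = pvFwd n s := by
    rw [pvFwd_eq_pvLev, pvLev_closed _ s n (by omega) hpw]
    rw [List.reverse_append, List.reverse_append, List.reverse_replicate,
      ← List.map_reverse, ← List.take_reverse]
    simp [List.length_reverse]
  rw [← key, List.reverse_reverse]

theorem change_folder_name_spec : Claim_equal_change_folder_name := by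
  intro arr rp _
  unfold Spec_change_folder_name change_folder_name change_folder_name_alt
  by_cases h1 : arr.length = 1
  · simp [h1]
  · by_cases h0 : arr.length = 0
    · obtain rfl : arr = [] := List.length_eq_zero_iff.mp h0
      norm_num
      rfl
    · simp only [h1, h0, if_false]
      have h2 : 2 ≤ arr.length := by omega
      -- A side: the loop is pvALoop, its trace is pvFwd, joined and stripped
      have hlen : (PySem.List.pyRange ((arr.length : Int) - 1) (-1) (-1)).length = arr.length := by
        rw [PySem.List.length_pyRange_neg_one]; omega
      rw [pvALoop_foldl, hlen, pvALoop_eq, List.append_nil, pvRstrip_flatTrail_eq_join]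
      -- B side: normalise stars, the slice, the slices s[:i], the base and the repeat
      have hstars : (PySem.List.enumerate rp.toList 0).filterMap
          (fun ic => if ic.2 = '*' then some ic.1 else none)
          = (pvStarPos rp.toList).map (fun j : Nat => (j : Int)) := by
        rw [stars_filterMap_eq]
        simp
      have hcast : ((arr.length : Int) - 1) = ((arr.length - 1 : Nat) : Int) := by
        omega
      rw [hstars, hcast, PySem.List.slice_from_neg_natCast _ _ (by omega),
        List.length_map, ← List.map_drop]
      have hmapsl : ((((pvStarPos rp.toList).drop
            ((pvStarPos rp.toList).length - (arr.length - 1))).map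
              (fun j : Nat => (j : Int))).map
            (fun i => PySem.List.slice rp.toList none (some i)))
          = ((pvStarPos rp.toList).drop
              ((pvStarPos rp.toList).length - (arr.length - 1))).map (rp.toList.take ·) := by
        rw [List.map_map]
        exact List.map_congr_left fun j _ => by simp [PySem.List.slice_to_natCast]
      have hbase : (match (pvStarPos rp.toList).map (fun j : Nat => (j : Int)) with
          | [] => rp.toList
          | j :: _ => PySem.List.slice rp.toList none (some j))
          = pvLevBase rp.toList (pvStarPos rp.toList).reverse := by
        rcases hp : pvStarPos rp.toList with _ | ⟨p0, rest⟩
        · simp [pvLevBase]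
        · simp [pvLevBase, PySem.List.slice_to_natCast, List.getLast?_reverse, hp]
      rw [hmapsl, hbase, PySem.List.pyRepeat_singleton,
        levels_eq rp.toList arr.length h2]
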